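-- pv_equiv track=rewrite | github.com/frankier/labyrinth | labyrinth.py | draw_players
-- ===== SOURCE A (Python) =====
-- def draw_players(coord, player_positions):
--     players_nibble = 0
--     for i in range(len(player_positions) - 1, -1, -1):
--         players_nibble <<= 1
--         if player_positions[i] == coord:
--             players_nibble |= 0x01
--     if players_nibble:
--         return hex(players_nibble)[2:]
--     return " "
-- ===== SOURCE B (Python) =====
-- HEX = "0123456789abcdef"
--
-- def draw_players(coord, player_positions):
--     # Build the hex string directly, one digit per 4-position chunk,
--     # without ever forming the full integer mask or calling hex().
--     digits = []
--     for j in range(0, len(player_positions), 4):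
--         d = 0
--         w = 1
--         for p in player_positions[j:j + 4]:
--             if p == coord:
--                 d += w
--             w *= 2
--         digits.append(HEX[d])
--     s = "".join(reversed(digits)).lstrip("0")
--     return s if s else " "
-- ===== Notes on version B (the rewrite author's own statement) =====
-- stated objective: alternative
-- what changed: B never forms the integer bitmask or calls hex(): it emits one hex digit per 4-position chunk directly into a character list, reverses it and strips leading zeros, instead of A's backward shift-accumulate over a big int followed by hex() formatting.
import Mathlib
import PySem

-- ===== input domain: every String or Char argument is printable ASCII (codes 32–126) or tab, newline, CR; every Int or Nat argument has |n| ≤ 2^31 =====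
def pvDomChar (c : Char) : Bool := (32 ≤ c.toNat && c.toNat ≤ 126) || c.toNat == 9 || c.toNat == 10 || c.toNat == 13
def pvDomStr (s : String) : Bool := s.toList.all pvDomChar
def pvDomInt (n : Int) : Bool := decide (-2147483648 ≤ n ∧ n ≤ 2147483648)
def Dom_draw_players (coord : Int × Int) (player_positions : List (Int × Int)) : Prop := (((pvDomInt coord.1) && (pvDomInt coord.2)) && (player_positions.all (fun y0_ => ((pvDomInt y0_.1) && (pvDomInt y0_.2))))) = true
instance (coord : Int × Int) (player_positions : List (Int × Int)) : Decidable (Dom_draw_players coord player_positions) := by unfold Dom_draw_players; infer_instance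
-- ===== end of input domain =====

-- B builds the hex string digit-by-digit from 4-position chunks (never forming the full
-- integer mask or calling hex), then strips leading zeros (objective: alternative).


-- ===== PORT A =====
-- hexDigit n = the character HEX digit; pyHex n = hex(n)[2:] for n ≥ 0 (exact for Python)
def hexDigit (n : Nat) : Char := Char.ofNat (if n < 10 then 48 + n else 87 + n)

def pyHex (n : Nat) : List Char :=
  if n < 16 then [hexDigit n]
  else pyHex (n / 16) ++ [hexDigit (n % 16)]
termination_by n
decreasing_by exact Nat.div_lt_self (by omega) (by norm_num)

-- nibble stays nonnegative throughout, so it is ported as a Nat accumulator;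
-- '<<= 1' is '<<< 1' and '|= 0x01' is '||| 1'.
def draw_players (coord : Int × Int) (player_positions : List (Int × Int)) : String :=
  let players_nibble : Nat :=
    (PySem.List.pyRange ((player_positions.length : Int) - 1) (-1) (-1)).foldl
      (fun acc i =>
        let acc := acc <<< 1
        if PySem.List.pyGetD player_positions i (0, 0) == coord then acc ||| 1 else acc)
      0
  if players_nibble ≠ 0 then String.ofList (pyHex players_nibble) else " "

-- ===== PORT B =====
-- the inner loop over one 4-position chunk: state (d, w), d += w on match, w *= 2
def nibbleChunk (coord : Int × Int) (chunk : List (Int × Int)) : Nat :=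
  (chunk.foldl (fun (dw : Nat × Nat) p =>
      (if p == coord then dw.1 + dw.2 else dw.1, dw.2 * 2)) (0, 1)).1

-- the outer loop 'for j in range(0, len, 4)': one HEX digit per chunk, in chunk order
def chunkDigits (coord : Int × Int) (pp : List (Int × Int)) : List Char :=
  if pp = [] then []
  else hexDigit (nibbleChunk coord (pp.take 4)) :: chunkDigits coord (pp.drop 4)
termination_by pp.length
decreasing_by
  simp only [List.length_drop]
  have : pp.length ≠ 0 := by simpa [List.length_eq_zero_iff] using ‹¬ pp = []›
  omega

def draw_players_alt (coord : Int × Int) (player_positions : List (Int × Int)) : String :=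
  let digits := chunkDigits coord player_positions
  let s := digits.reverse.dropWhile (fun ch => ch == '0')
  if s ≠ [] then String.ofList s else " "

-- ===== PRECONDITION & SPEC =====
def Spec_draw_players (coord : Int × Int) (player_positions : List (Int × Int)) (out : String) : Prop := out = draw_players_alt coord player_positions
instance (coord : Int × Int) (player_positions : List (Int × Int)) (out : String) : Decidable (Spec_draw_players coord player_positions out) := by unfold Spec_draw_players; infer_instance

-- ===== CLAIM (what is proved, stated in full; the proofs are below) =====
def Claim_equal_draw_players : Prop := ∀ (coord : Int × Int) (player_positions : List (Int × Int)), Dom_draw_players coord player_positions → Spec_draw_players coord player_positions (draw_players coord player_positions)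

-- ===== LEMMAS AND PROOFS =====

-- the bitmask of matching positions, recursively (least significant bit first)
def maskR (c : Int × Int) : List (Int × Int) → Nat
  | [] => 0
  | p :: l => (if p == c then 1 else 0) + 2 * maskR c l

theorem maskR_append (c : Int × Int) (l m : List (Int × Int)) :
    maskR c (l ++ m) = maskR c l + 2 ^ l.length * maskR c m := by
  induction l with
  | nil => simp [maskR]
  | cons p l ih => simp only [List.cons_append, maskR, ih, List.length_cons]; ring

theorem maskR_append_single (c x : Int × Int) (pp : List (Int × Int)) :
    maskR c (pp ++ [x]) = maskR c pp + (if x == c then 2 ^ pp.length else 0) := by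
  rw [maskR_append]
  by_cases hx : x == c <;> simp [maskR, hx]

theorem maskR_lt (c : Int × Int) (l : List (Int × Int)) : maskR c l < 2 ^ l.length := by
  induction l with
  | nil => simp [maskR]
  | cons p l ih =>
    simp only [maskR, List.length_cons, pow_succ]
    by_cases hp : p == c <;> simp [hp] <;> omega

theorem or_one (a : Nat) : (2 * a) ||| 1 = 2 * a + 1 := by
  have h : Nat.bit false a ||| Nat.bit true 0 = Nat.bit true a := by
    rw [Nat.lor_bit]; simp
  simpa [Nat.bit] using h

theorem shl1 (a : Nat) : a <<< 1 = 2 * a := by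
  rw [Nat.shiftLeft_eq]; ring

theorem shl1_or (a : Nat) : (a <<< 1) ||| 1 = 2 * a + 1 := by
  rw [shl1]; exact or_one a

-- A's backward loop, generalized over the initial accumulator
theorem loopA (c : Int × Int) (pp : List (Int × Int)) (a : Nat) :
    (PySem.List.pyRange ((pp.length : Int) - 1) (-1) (-1)).foldl
      (fun acc i =>
        let acc := acc <<< 1
        if PySem.List.pyGetD pp i (0, 0) == c then acc ||| 1 else acc) a
      = a * 2 ^ pp.length + maskR c pp := by
  induction pp using List.reverseRecOn generalizing a with
  | nil =>
    rw [PySem.List.pyRange_neg_one_eq_nil (by norm_num)]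
    simp [maskR]
  | append_singleton xs x ih =>
    have hn : ((xs ++ [x]).length : Int) - 1 = (xs.length : Int) := by
      simp only [List.length_append, List.length_cons, List.length_nil]; omega
    have hget : PySem.List.pyGetD (xs ++ [x]) (xs.length : Int) ((0 : Int), (0 : Int)) = x := by
      rw [PySem.List.pyGetD_natCast]
      simp [List.getD]
    rw [hn, PySem.List.pyRange_neg_one_cons (by omega), List.foldl_cons, hget]
    have hcongr : ∀ b : Nat,
        (PySem.List.pyRange ((xs.length : Int) - 1) (-1) (-1)).foldl
          (fun acc i =>
            let acc := acc <<< 1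
            if PySem.List.pyGetD (xs ++ [x]) i (0, 0) == c then acc ||| 1 else acc) b
          =
        (PySem.List.pyRange ((xs.length : Int) - 1) (-1) (-1)).foldl
          (fun acc i =>
            let acc := acc <<< 1
            if PySem.List.pyGetD xs i (0, 0) == c then acc ||| 1 else acc) b := by
      intro b
      apply PySem.List.foldl_congr_mem
      intro acc i hi
      simp only []
      rw [PySem.List.mem_pyRange_neg_one] at hi
      have h0 : (0 : Int) ≤ i := by omega
      have h1 : i < (xs.length : Int) := by omega
      have h2 : i < ((xs ++ [x]).length : Int) := by
        simp only [List.length_append, List.length_cons, List.length_nil]; push_cast; omega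
      rw [PySem.List.pyGetD_eq_getElem (xs ++ [x]) ((0 : Int), (0 : Int)) h0 h2,
        PySem.List.pyGetD_eq_getElem xs ((0 : Int), (0 : Int)) h0 h1,
        List.getElem_append_left (by omega)]
    rw [hcongr, ih, maskR_append_single]
    by_cases hx : x == c
    · rw [if_pos hx, if_pos hx, shl1_or]
      simp only [List.length_append, List.length_cons, List.length_nil]
      ring
    · rw [if_neg hx, if_neg hx, shl1]
      simp only [List.length_append, List.length_cons, List.length_nil]
      ring

-- B's inner chunk loop computes maskR of the chunk
theorem nibbleChunk_fold (c : Int × Int) (ch : List (Int × Int)) (d w : Nat) :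
    (ch.foldl (fun (dw : Nat × Nat) p =>
        (if p == c then dw.1 + dw.2 else dw.1, dw.2 * 2)) (d, w)).1
      = d + w * maskR c ch := by
  induction ch generalizing d w with
  | nil => simp [maskR]
  | cons p l ih =>
    rw [List.foldl_cons]
    by_cases hp : p == c
    · rw [if_pos hp, ih]
      simp only [maskR, if_pos hp]; ring
    · rw [if_neg hp, ih]
      simp only [maskR, if_neg hp]; ring

theorem nibbleChunk_eq (c : Int × Int) (ch : List (Int × Int)) :
    nibbleChunk c ch = maskR c ch := by
  unfold nibbleChunk
  rw [nibbleChunk_fold]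
  ring

-- the nibble values of the chunks, least significant first
def nibbles (c : Int × Int) (pp : List (Int × Int)) : List Nat :=
  if pp = [] then []
  else maskR c (pp.take 4) :: nibbles c (pp.drop 4)
termination_by pp.length
decreasing_by
  simp only [List.length_drop]
  have : pp.length ≠ 0 := by simpa [List.length_eq_zero_iff] using ‹¬ pp = []›
  omega

theorem chunkDigits_eq_map (c : Int × Int) (pp : List (Int × Int)) :
    chunkDigits c pp = (nibbles c pp).map hexDigit := by
  induction pp using chunkDigits.induct with
  | case1 => rw [chunkDigits, nibbles]; simp
  | case2 pp h ih =>
    rw [chunkDigits, nibbles]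
    simp only [if_neg h, List.map_cons, nibbleChunk_eq, ih]

-- the base-16 value of a digit list (least significant first)
def val16 : List Nat → Nat
  | [] => 0
  | d :: ds => d + 16 * val16 ds

theorem val16_nibbles (c : Int × Int) (pp : List (Int × Int)) :
    val16 (nibbles c pp) = maskR c pp := by
  induction pp using nibbles.induct with
  | case1 => rw [nibbles]; simp [val16, maskR]
  | case2 pp h ih =>
    rw [nibbles, if_neg h]
    simp only [val16, ih]
    have htd := maskR_append c (pp.take 4) (pp.drop 4)
    rw [List.take_append_drop] at htd
    rw [htd]
    have hlen : pp.length ≠ 0 := by simpa [List.length_eq_zero_iff] using h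
    by_cases h4 : pp.length ≤ 4
    · have : pp.drop 4 = [] := List.drop_eq_nil_of_le h4
      simp [this, maskR]
    · have : (pp.take 4).length = 4 := by simp [List.length_take]; omega
      rw [this]; norm_num

theorem nibbles_lt (c : Int × Int) (pp : List (Int × Int)) :
    ∀ d ∈ nibbles c pp, d < 16 := by
  induction pp using nibbles.induct with
  | case1 => rw [nibbles]; simp
  | case2 pp h ih =>
    rw [nibbles, if_neg h]
    intro d hd
    rcases List.mem_cons.mp hd with h1 | h2
    · subst h1
      have := maskR_lt c (pp.take 4)
      have hl : (pp.take 4).length ≤ 4 := by simp [List.length_take]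
      calc maskR c (pp.take 4) < 2 ^ (pp.take 4).length := this
        _ ≤ 2 ^ 4 := Nat.pow_le_pow_right (by norm_num) hl
        _ = 16 := by norm_num
    · exact ih d h2

theorem hexDigit_zero : hexDigit 0 = '0' := by decide

theorem hexDigit_ne_zero (d : Nat) (h16 : d < 16) (h0 : d ≠ 0) :
    (hexDigit d == '0') = false := by
  interval_cases d <;> simp_all <;> decide

theorem val16_of_all_zero (ds : List Nat) (h : ∀ x ∈ ds, x = 0) : val16 ds = 0 := by
  induction ds with
  | nil => rfl
  | cons y ys ih =>
    simp only [val16]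
    rw [h y (List.mem_cons_self ..), ih (fun x hx => h x (List.mem_cons_of_mem _ hx))]

theorem val16_zero (ds : List Nat) (h : val16 ds = 0) : ∀ d ∈ ds, d = 0 := by
  induction ds with
  | nil => simp
  | cons d ds ih =>
    simp only [val16] at h
    intro x hx
    rcases List.mem_cons.mp hx with h1 | h2
    · omega
    · exact ih (by omega) x h2

-- hex(n)[2:] of the value of a digit list = the reversed digits with leading zeros stripped
theorem pyHex_val (ds : List Nat) (h : ∀ d ∈ ds, d < 16) :
    pyHex (val16 ds) =
      if val16 ds = 0 then ['0']
      else (ds.map hexDigit).reverse.dropWhile (fun ch => ch == '0') := by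
  induction ds with
  | nil => rw [pyHex]; simp [val16, hexDigit_zero]
  | cons d ds ih =>
    have hd : d < 16 := h d (List.mem_cons_self ..)
    have hds : ∀ x ∈ ds, x < 16 := fun x hx => h x (List.mem_cons_of_mem _ hx)
    have hvd : val16 (d :: ds) = d + 16 * val16 ds := rfl
    by_cases hv : val16 ds = 0
    · have hall : ∀ ch ∈ (ds.map hexDigit).reverse, (ch == '0') = true := by
        intro ch hch
        rcases List.mem_map.mp (List.mem_reverse.mp hch) with ⟨x, hx, rfl⟩
        rw [val16_zero ds hv x hx, hexDigit_zero]; rfl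
      have hdrop : (ds.map hexDigit).reverse.dropWhile (fun ch => ch == '0') = [] :=
        List.dropWhile_eq_nil_iff.mpr (by intro ch hch; exact hall ch hch)
      have hd16 : val16 (d :: ds) = d := by rw [hvd, hv]; omega
      rw [hd16]
      by_cases hd0 : d = 0
      · subst hd0
        rw [pyHex]
        simp [hexDigit_zero]
      · rw [pyHex, if_pos (by omega)]
        rw [if_neg hd0]
        simp only [List.map_cons, List.reverse_cons]
        rw [List.dropWhile_append, hdrop]
        simp [hexDigit_ne_zero d hd hd0]
    · have hge : 16 ≤ val16 (d :: ds) := by rw [hvd]; omega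
      rw [pyHex, if_neg (by omega)]
      have hdiv : val16 (d :: ds) / 16 = val16 ds := by rw [hvd]; omega
      have hmod : val16 (d :: ds) % 16 = d := by rw [hvd]; omega
      rw [hdiv, hmod, ih hds, if_neg hv, if_neg (by omega)]
      simp only [List.map_cons, List.reverse_cons]
      rw [List.dropWhile_append]
      have hnonempty : ((ds.map hexDigit).reverse.dropWhile (fun ch => ch == '0')).isEmpty = false := by
        rw [List.isEmpty_eq_false_iff, Ne, List.dropWhile_eq_nil_iff]
        intro hall
        apply hv
        have hz0 : ∀ x ∈ ds, x = 0 := by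
          intro x hx
          by_contra hx0
          have := hall (hexDigit x) (List.mem_reverse.mpr (List.mem_map.mpr ⟨x, hx, rfl⟩))
          rw [hexDigit_ne_zero x (hds x hx) hx0] at this
          exact Bool.false_ne_true this
        exact val16_of_all_zero ds hz0
      rw [hnonempty]
      simp

-- ===== VERDICT (by name: the statement is the Claim_ definition above) =====
theorem draw_players_spec : Claim_equal_draw_players := by
  intro c pp _
  unfold Spec_draw_players draw_players draw_players_alt
  rw [loopA c pp 0]
  simp only [Nat.zero_mul, Nat.zero_add]
  rw [chunkDigits_eq_map]
  have hkey := pyHex_val (nibbles c pp) (nibbles_lt c pp)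
  rw [val16_nibbles] at hkey
  by_cases hz : maskR c pp = 0
  · rw [if_neg (by simpa using hz)]
    have hall : ∀ ch ∈ ((nibbles c pp).map hexDigit).reverse, (ch == '0') = true := by
      intro ch hch
      rcases List.mem_map.mp (List.mem_reverse.mp hch) with ⟨x, hx, rfl⟩
      have hx0 : x = 0 := val16_zero _ (by rw [val16_nibbles]; exact hz) x hx
      rw [hx0, hexDigit_zero]; rfl
    rw [List.dropWhile_eq_nil_iff.mpr (by intro ch hch; exact hall ch hch)]
    simp
  · rw [if_pos hz, hkey, if_neg hz]
    have hne : ((nibbles c pp).map hexDigit).reverse.dropWhile (fun ch => ch == '0') ≠ [] := by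
      have h2 : pyHex (maskR c pp)
          = ((nibbles c pp).map hexDigit).reverse.dropWhile (fun ch => ch == '0') := by
        rw [hkey, if_neg hz]
      rw [← h2]
      intro habs
      rw [pyHex] at habs
      by_cases h16 : maskR c pp < 16
      · rw [if_pos h16] at habs; exact List.cons_ne_nil _ _ habs
      · rw [if_neg h16] at habs
        exact List.append_ne_nil_of_right_ne_nil _ (List.cons_ne_nil _ _) habs
    rw [if_pos hne]
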